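-- pv_equiv track=rewrite | github.com/manuelangladatort/2024-ising-natural-emotion | sing/melodies.py | is_valid_interval_sequence
-- ===== SOURCE A (Python) =====
-- def is_valid_interval_sequence(
--         intervals,
--         n_int,
--         max_interval_size,
--         max_melody_pitch_range,
--         reference_mode,
--     ):
--     """
--     Checks whether an interval sequence is valid according to the constraints
--     expressed in the options.
--     This can be used, for example, for making sure that sequences stay within bounds in
--     serial reproduction experiments.
--
--     Parameters
--     ----------
--
--     intervals:
--         A list of intervals, with each interval expressed as a number.
--
--     max_interval_size:
--         Maximum size interval allowed in the melody; see params.py.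
--
--     max_melody_pitch_range:
--         Maximum pitch range allowed in the melody; see params.py
--
--     discrete:
--         If ``True``, the intervals are constrained to take integer values.
--
--     reference_mode:
--         Can be ``"first_note"`` or ``"previous_note"``.
--         When the ``reference_mode`` is ``"first_note"``, this means that each interval is expressed relative
--         to the first note in the melody. For example, a major triad would be expressed as ``[4, 7]``.
--         When the ``reference_mode`` is ``"previous_note"``, this means that each interval is expressed relative
--         to the previous note in the melody. For example, a major triad would be expressed as ``[4, 3]``.
--     """
--     try:
--         assert len(intervals) == n_int
--         for interval in intervals:
--             assert abs(interval) <= max_interval_size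
--         assert get_melody_pitch_range(intervals, reference_mode) <= max_melody_pitch_range
--         return True
--     except AssertionError:
--         return False
--
-- def get_melody_pitch_range(intervals, reference_mode):
--     """
--     Gets the range of pitches used in an interval sequence.
--     """
--     example_pitches = convert_interval_sequence_to_absolute_pitches(
--         intervals,
--         reference_pitch=60,
--         reference_mode=reference_mode
--     )
--     return max(example_pitches) - min(example_pitches)
--
-- def convert_interval_sequence_to_absolute_pitches(intervals, reference_pitch, reference_mode):
--     """
--     Takes an interval sequence and converts it to a set of absolute pitches,
--     i.e. MIDI note numbers where 60 corresponds to middle C (C4) and integers correspond to semitones.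
--
--     Parameters
--     ----------
--
--     intervals:
--         A list of intervals, with each interval expressed as a number.
--
--     reference_pitch:
--         The reference pitch to use, expressed as a MIDI note number. The interpretation of this pitch
--         is determined by the latter ``reference_mode`` argument.
--
--     reference_mode:
--         Can be ``"first_note"`` or ``"previous_note"``.
--         When the ``reference_mode`` is ``"first_note"``, this means that each interval is expressed relative
--         to the first note in the melody. For example, a major triad would be expressed as ``[4, 7]``.
--         When the ``reference_mode`` is ``"previous_note"``, this means that each interval is expressed relative
--         to the previous note in the melody. For example, a major triad would be expressed as ``[4, 3]``.
--
--     Returns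
--     -------
--
--     A list of absolute pitches, expressed as MIDI note numbers.
--     """
--     if reference_mode == "first_note":
--         first_note = reference_pitch
--         return [first_note] + [interval + reference_pitch for interval in intervals]
--     elif reference_mode == "previous_note":
--         pitches = [reference_pitch]
--         for interval in intervals:
--             last_pitch = pitches[-1]
--             new_pitch = last_pitch + interval
--             pitches.append(new_pitch)
--         return pitches
--     else:
--         raise ValueError(f"Unrecognized reference_mode: {reference_mode}.")
-- ===== SOURCE B (Python) =====
-- def is_valid_interval_sequence(
--         intervals,
--         n_int,
--         max_interval_size,
--         max_melody_pitch_range,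
--         reference_mode,
--     ):
--     if len(intervals) != n_int:
--         return False
--     if any(abs(interval) > max_interval_size for interval in intervals):
--         return False
--     if reference_mode == "first_note":
--         prev = False
--     elif reference_mode == "previous_note":
--         prev = True
--     else:
--         raise ValueError(f"Unrecognized reference_mode: {reference_mode}.")
--     cur = mx = mn = 60
--     for interval in intervals:
--         cur = cur + interval if prev else 60 + interval
--         if cur > mx:
--             mx = cur
--         if cur < mn:
--             mn = cur
--     return mx - mn <= max_melody_pitch_range
-- ===== Notes on version B (the rewrite author's own statement) =====
-- stated objective: simpler
-- what changed: Replaces the helper chain (build full absolute-pitch list, then max/min over it) by a single fused pass keeping the current pitch and running max/min, with early returns instead of try/assert.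
import Mathlib
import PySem

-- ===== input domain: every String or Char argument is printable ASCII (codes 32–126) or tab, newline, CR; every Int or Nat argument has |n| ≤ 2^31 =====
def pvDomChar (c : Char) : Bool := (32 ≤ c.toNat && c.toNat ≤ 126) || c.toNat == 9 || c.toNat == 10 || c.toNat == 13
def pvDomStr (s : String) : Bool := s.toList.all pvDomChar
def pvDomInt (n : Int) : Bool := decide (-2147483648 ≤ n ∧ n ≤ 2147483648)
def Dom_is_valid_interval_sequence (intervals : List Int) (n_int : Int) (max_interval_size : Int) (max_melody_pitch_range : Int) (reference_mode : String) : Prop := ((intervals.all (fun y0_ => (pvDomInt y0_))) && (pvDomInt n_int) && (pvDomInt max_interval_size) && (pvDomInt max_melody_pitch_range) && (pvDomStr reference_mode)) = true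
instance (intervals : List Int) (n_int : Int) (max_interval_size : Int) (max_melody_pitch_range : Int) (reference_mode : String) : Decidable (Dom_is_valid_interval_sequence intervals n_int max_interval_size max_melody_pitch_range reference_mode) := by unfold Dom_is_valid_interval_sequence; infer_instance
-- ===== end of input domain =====

-- B fuses A's helper chain (build the absolute-pitch list, then max/min over it) into one
-- running max/min pass with early returns; same return value on every input A returns on.


-- ===== PORT A =====
-- convert_interval_sequence_to_absolute_pitches; none = ValueError on unrecognized mode.
-- pitches[-1] on the always-nonempty accumulator is ported as getLast! (exact here).
def pvConvert? (intervals : List Int) (reference_pitch : Int) (reference_mode : String) : Option (List Int) :=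
  if reference_mode = "first_note" then
    some (reference_pitch :: intervals.map (fun interval => interval + reference_pitch))
  else if reference_mode = "previous_note" then
    some (intervals.foldl (fun pitches interval => pitches ++ [pitches.getLast! + interval]) [reference_pitch])
  else none

-- get_melody_pitch_range; the pitch list is always nonempty so max/min never raise (getD 0 unreachable).
def pvRange? (intervals : List Int) (reference_mode : String) : Option Int :=
  (pvConvert? intervals 60 reference_mode).map (fun ps =>
    (PySem.List.max? ps (fun x => x)).getD 0 - (PySem.List.min? ps (fun x => x)).getD 0)

def is_valid_interval_sequence (intervals : List Int) (n_int : Int) (max_interval_size : Int) (max_melody_pitch_range : Int) (reference_mode : String) : Bool :=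
  if (intervals.length : Int) = n_int then
    if intervals.all (fun interval => decide (|interval| ≤ max_interval_size)) then
      match pvRange? intervals reference_mode with
      | some r => decide (r ≤ max_melody_pitch_range)
      | none => false   -- ValueError propagates in Python; excluded by Pre_
    else false
  else false

-- ===== PORT B =====
def is_valid_interval_sequence_alt (intervals : List Int) (n_int : Int) (max_interval_size : Int) (max_melody_pitch_range : Int) (reference_mode : String) : Bool :=
  if (intervals.length : Int) ≠ n_int then false
  else if intervals.any (fun interval => decide (max_interval_size < |interval|)) then false
  else if reference_mode = "first_note" ∨ reference_mode = "previous_note" then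
    let prev := reference_mode = "previous_note"
    let s := intervals.foldl (fun (s : Int × Int × Int) interval =>
        let cur := if prev then s.1 + interval else 60 + interval
        (cur, if s.2.1 < cur then cur else s.2.1, if cur < s.2.2 then cur else s.2.2))
      (60, 60, 60)
    decide (s.2.1 - s.2.2 ≤ max_melody_pitch_range)
  else false   -- ValueError in Python B; excluded by Pre_

-- ===== PRECONDITION & SPEC =====
-- Pre_ excludes exactly the inputs on which A raises ValueError (unrecognized reference_mode
-- reached after the length and interval-size asserts pass); B raises the same ValueError there.
def Pre_is_valid_interval_sequence (intervals : List Int) (n_int : Int) (max_interval_size : Int) (max_melody_pitch_range : Int) (reference_mode : String) : Prop :=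
  reference_mode = "first_note" ∨ reference_mode = "previous_note" ∨
  (intervals.length : Int) ≠ n_int ∨ ¬ (intervals.all (fun interval => decide (|interval| ≤ max_interval_size)) = true)
instance (intervals : List Int) (n_int : Int) (max_interval_size : Int) (max_melody_pitch_range : Int) (reference_mode : String) : Decidable (Pre_is_valid_interval_sequence intervals n_int max_interval_size max_melody_pitch_range reference_mode) := by unfold Pre_is_valid_interval_sequence; infer_instance
def pvWitness_is_valid_interval_sequence : List Int × Int × Int × Int × String := ([4, 3], 2, 12, 24, "previous_note")

def Spec_is_valid_interval_sequence (intervals : List Int) (n_int : Int) (max_interval_size : Int) (max_melody_pitch_range : Int) (reference_mode : String) (out : Bool) : Prop := out = is_valid_interval_sequence_alt intervals n_int max_interval_size max_melody_pitch_range reference_mode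
instance (intervals : List Int) (n_int : Int) (max_interval_size : Int) (max_melody_pitch_range : Int) (reference_mode : String) (out : Bool) : Decidable (Spec_is_valid_interval_sequence intervals n_int max_interval_size max_melody_pitch_range reference_mode out) := by unfold Spec_is_valid_interval_sequence; infer_instance

-- ===== CLAIM (what is proved, stated in full; the proofs are below) =====
def Claim_equal_is_valid_interval_sequence : Prop := ∀ (intervals : List Int) (n_int : Int) (max_interval_size : Int) (max_melody_pitch_range : Int) (reference_mode : String), Dom_is_valid_interval_sequence intervals n_int max_interval_size max_melody_pitch_range reference_mode → Pre_is_valid_interval_sequence intervals n_int max_interval_size max_melody_pitch_range reference_mode → Spec_is_valid_interval_sequence intervals n_int max_interval_size max_melody_pitch_range reference_mode (is_valid_interval_sequence intervals n_int max_interval_size max_melody_pitch_range reference_mode)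

-- ===== LEMMAS AND PROOFS =====

theorem pv_if_max (m c : Int) : (if m < c then c else m) = max m c := by omega
theorem pv_if_min (n c : Int) : (if c < n then c else n) = min n c := by omega

-- the tail of the "previous_note" pitch list, after the leading reference pitch
def pvScan (c : Int) : List Int → List Int
  | [] => []
  | iv :: t => (c + iv) :: pvScan (c + iv) t

theorem pvScan_fold (l : List Int) : ∀ (ps : List Int) (c : Int), ps ≠ [] → ps.getLast! = c →
    l.foldl (fun pitches interval => pitches ++ [pitches.getLast! + interval]) ps
      = ps ++ pvScan c l := by
  induction l with
  | nil => intro ps c _ _; simp [pvScan]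
  | cons iv t ih =>
    intro ps c hne hl
    simp only [List.foldl_cons, pvScan]
    rw [hl, ih (ps ++ [c + iv]) (c + iv) (by simp)
        (by simp [List.getLast!_eq_getLast?_getD])]
    simp

-- B's fused loop computes the running max/min of the corresponding pitch tail
theorem pvFold_prev (l : List Int) : ∀ (c m n : Int),
    (l.foldl (fun (s : Int × Int × Int) interval =>
        (s.1 + interval, if s.2.1 < s.1 + interval then s.1 + interval else s.2.1,
          if s.1 + interval < s.2.2 then s.1 + interval else s.2.2))
      (c, m, n)).2
    = ((pvScan c l).foldl max m, (pvScan c l).foldl min n) := by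
  induction l with
  | nil => intro c m n; simp [pvScan]
  | cons iv t ih =>
    intro c m n
    rw [List.foldl_cons, ih, pvScan, List.foldl_cons, List.foldl_cons, pv_if_max, pv_if_min]

theorem pvFold_first (l : List Int) : ∀ (c m n : Int),
    (l.foldl (fun (s : Int × Int × Int) interval =>
        (60 + interval, if s.2.1 < 60 + interval then 60 + interval else s.2.1,
          if 60 + interval < s.2.2 then 60 + interval else s.2.2))
      (c, m, n)).2
    = ((l.map (fun interval => interval + 60)).foldl max m,
       (l.map (fun interval => interval + 60)).foldl min n) := by
  induction l with
  | nil => intro c m n; simp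
  | cons iv t ih =>
    intro c m n
    rw [List.foldl_cons, ih, List.map_cons, List.foldl_cons, List.foldl_cons,
      pv_if_max, pv_if_min, Int.add_comm 60 iv]

theorem pv_any_not_all (intervals : List Int) (M : Int) :
    intervals.any (fun interval => decide (M < |interval|))
      = ! intervals.all (fun interval => decide (|interval| ≤ M)) := by
  induction intervals with
  | nil => simp
  | cons iv t ih =>
    simp only [List.any_cons, List.all_cons, Bool.not_and, ← ih]
    by_cases h : M < |iv|
    · simp [h, show ¬ (|iv| ≤ M) from by omega]
    · simp [h, show |iv| ≤ M from by omega]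

theorem is_valid_interval_sequence_spec : Claim_equal_is_valid_interval_sequence := by
  intro intervals n_int mis mpr mode _ hpre
  unfold Spec_is_valid_interval_sequence
  by_cases hlen : (intervals.length : Int) = n_int
  · subst hlen
    by_cases hall : intervals.all (fun interval => decide (|interval| ≤ mis)) = true
    · have hmode : mode = "first_note" ∨ mode = "previous_note" := by
        rcases hpre with h | h | h | h
        · exact Or.inl h
        · exact Or.inr h
        · exact absurd rfl h
        · exact absurd hall h
      rcases hmode with h | h
      · subst h
        simp only [is_valid_interval_sequence, is_valid_interval_sequence_alt, pvRange?,
          pvConvert?, hall, pv_any_not_all, Bool.not_true, ne_eq, not_true_eq_false,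
          String.reduceEq, if_true, if_false, reduceIte, ite_true, ite_false, or_false,
          true_or, Option.map_some, Bool.false_eq_true]
        rw [PySem.List.max?_id_cons, PySem.List.min?_id_cons, pvFold_first intervals 60 60 60]
        rfl
      · subst h
        simp only [is_valid_interval_sequence, is_valid_interval_sequence_alt, pvRange?,
          pvConvert?, hall, pv_any_not_all, Bool.not_true, ne_eq, not_true_eq_false,
          String.reduceEq, if_true, if_false, reduceIte, ite_true, ite_false, or_true,
          Option.map_some, Bool.false_eq_true]
        rw [pvScan_fold intervals [60] 60 (by simp) (by simp [List.getLast!_eq_getLast?_getD]),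
          List.singleton_append, PySem.List.max?_id_cons, PySem.List.min?_id_cons,
          pvFold_prev intervals 60 60 60]
        rfl
    · simp [is_valid_interval_sequence, is_valid_interval_sequence_alt, pv_any_not_all, hall]
  · simp [is_valid_interval_sequence, is_valid_interval_sequence_alt, hlen]
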